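-- pv_equiv track=rewrite | github.com/Lapin0t/ppass | andrei.py | count_transitions
-- ===== SOURCE A (Python) =====
-- def count_transitions(words, n):
--     trans = {}
--     for w in words:
--         xs = '\x00'*n + w + '\x01'
--         for i in range(len(w)+1):
--             curr = xs[i:i+n]
--             succ = xs[i+n]
--             if curr not in trans:
--                 trans[curr] = {succ: 1}
--             elif succ not in trans[curr]:
--                 trans[curr][succ] = 1
--             else:
--                 trans[curr][succ] += 1
--     return trans
-- ===== SOURCE B (Python) =====
-- def count_transitions(words, n):
--     def word_pairs(w):
--         xs = '\x00' * n + w + '\x01'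
--         return [(xs[i:i + n], xs[i + n]) for i in range(len(w) + 1)]
--     pairs = [p for w in words for p in word_pairs(w)]
--     return {c: {s: pairs.count((c, s))
--                 for s in dict.fromkeys(s2 for c2, s2 in pairs if c2 == c)}
--             for c in dict.fromkeys(c for c, _ in pairs)}
-- ===== Notes on version B (the rewrite author's own statement) =====
-- stated objective: alternative
-- what changed: A counts incrementally in one scan, updating a nested dict with a three-way branch at every position; B never maintains running counts: it materialises the flat list of (curr, succ) pairs and builds the result declaratively by dict comprehensions over the deduplicated keys, counting each cell with pairs.count.
import Mathlib
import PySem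

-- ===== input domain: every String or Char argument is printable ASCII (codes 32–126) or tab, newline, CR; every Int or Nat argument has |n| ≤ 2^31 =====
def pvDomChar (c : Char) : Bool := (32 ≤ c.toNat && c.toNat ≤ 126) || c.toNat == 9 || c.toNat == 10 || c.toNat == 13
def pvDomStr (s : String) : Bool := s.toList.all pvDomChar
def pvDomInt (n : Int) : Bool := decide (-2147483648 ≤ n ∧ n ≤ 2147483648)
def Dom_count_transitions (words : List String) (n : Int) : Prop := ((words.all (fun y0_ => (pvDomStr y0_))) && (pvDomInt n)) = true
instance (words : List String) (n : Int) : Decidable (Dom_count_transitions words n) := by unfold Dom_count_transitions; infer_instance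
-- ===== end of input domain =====

-- B drops A's incremental nested-dict counting: it materialises the flat pair list and builds
-- the result by comprehensions over deduplicated keys, counting each cell with pairs.count
-- (alternative decomposition; B is not faster).

-- ===== PORT A =====
-- xs = '\x00'*n + w + '\x01' (negative n gives no padding)
def ctXs (n : Int) (w : String) : List Char :=
  List.replicate n.toNat '\x00' ++ w.toList ++ ['\x01']

-- curr = xs[i:i+n]; succ = xs[i+n] (when the index raises — excluded by Pre_ — succ is "")
def ctPair (n : Int) (xs : List Char) (i : Int) : String × String :=
  (String.mk (PySem.List.slice xs (some i) (some (i + n))),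
   String.mk ((PySem.List.pyGet? xs (i + n)).elim [] (fun c => [c])))

-- body of A's inner loop (the three-way if on trans / trans[curr])
def ctStepN (tr : PySem.Dict String (PySem.Dict String Int)) (p : String × String) :
    PySem.Dict String (PySem.Dict String Int) :=
  match tr.get? p.1 with
  | none => tr.insert p.1 (PySem.Dict.empty.insert p.2 1)
  | some d =>
    match d.get? p.2 with
    | none => tr.insert p.1 (d.insert p.2 1)
    | some c => tr.insert p.1 (d.insert p.2 (c + 1))

def count_transitions (words : List String) (n : Int) : List (String × List (String × Int)) :=
  ((words.foldl (fun tr w =>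
      (PySem.List.pyRange 0 (PySem.Str.len w + 1) 1).foldl
        (fun tr i => ctStepN tr (ctPair n (ctXs n w) i)) tr)
    PySem.Dict.empty).items).map (fun p => (p.1, p.2.items))

-- ===== PORT B =====
-- word_pairs(w) = [(xs[i:i+n], xs[i+n]) for i in range(len(w)+1)], xs = '\x00'*n + w + '\x01'
def ctWordPairs (n : Int) (w : String) : List (String × String) :=
  let xs := List.replicate n.toNat '\x00' ++ w.toList ++ ['\x01']
  (PySem.List.pyRange 0 (PySem.Str.len w + 1) 1).map (fun i =>
    (String.mk (PySem.List.slice xs (some i) (some (i + n))),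
     String.mk ((PySem.List.pyGet? xs (i + n)).elim [] (fun c => [c]))))

-- {c: {s: pairs.count((c,s)) for s in fromkeys(...)} for c in fromkeys(...)}
def count_transitions_alt (words : List String) (n : Int) : List (String × List (String × Int)) :=
  let pairs := words.flatMap (fun w => ctWordPairs n w)
  (PySem.List.dedup (pairs.map (fun q => q.1))).map (fun c =>
    (c, (PySem.List.dedup ((pairs.filter (fun q => q.1 == c)).map (fun q => q.2))).map
      (fun s => (s, (pairs.count (c, s) : Int)))))

-- ===== PRECONDITION & SPEC =====
-- Pre_ excludes exactly the inputs where the Python raises IndexError: an n so negative that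
-- for some word the index i+n falls before the start of the padded string.
def Pre_count_transitions (words : List String) (n : Int) : Prop :=
  ∀ w ∈ words, -(PySem.Str.len w + 1) ≤ n
instance (words : List String) (n : Int) : Decidable (Pre_count_transitions words n) := by
  unfold Pre_count_transitions; infer_instance

def pvWitness_count_transitions : List String × Int := (["ab", "b"], 2)

def Spec_count_transitions (words : List String) (n : Int) (out : List (String × List (String × Int))) : Prop := out = count_transitions_alt words n
instance (words : List String) (n : Int) (out : List (String × List (String × Int))) : Decidable (Spec_count_transitions words n out) := by unfold Spec_count_transitions; infer_instance

-- ===== CLAIM (what is proved, stated in full; the proofs are below) =====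
def Claim_equal_count_transitions : Prop := ∀ (words : List String) (n : Int), Dom_count_transitions words n → Pre_count_transitions words n → Spec_count_transitions words n (count_transitions words n)

-- ===== LEMMAS AND PROOFS =====

-- the stream of (curr, succ) pairs both programs enumerate, in order
def ctPairs (words : List String) (n : Int) : List (String × String) :=
  words.flatMap (fun w => (PySem.List.pyRange 0 (PySem.Str.len w + 1) 1).map (ctPair n (ctXs n w)))

-- B's result as a function of its flat pair list
def ctInnerSpec (ps : List (String × String)) (c : String) : List (String × Int) :=
  (PySem.List.dedup ((ps.filter (fun q => q.1 == c)).map (fun q => q.2))).map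
    (fun s => (s, (ps.count (c, s) : Int)))

def ctSpec (ps : List (String × String)) : List (String × List (String × Int)) :=
  (PySem.List.dedup (ps.map (fun q => q.1))).map (fun c => (c, ctInnerSpec ps c))

-- the value A's step stores at key p.1
def ctVal (tr : PySem.Dict String (PySem.Dict String Int)) (p : String × String) :
    PySem.Dict String Int :=
  match tr.get? p.1 with
  | none => PySem.Dict.empty.insert p.2 1
  | some d =>
    match d.get? p.2 with
    | none => d.insert p.2 1
    | some c => d.insert p.2 (c + 1)

lemma ctStepN_eq_insert (tr : PySem.Dict String (PySem.Dict String Int)) (p : String × String) :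
    ctStepN tr p = tr.insert p.1 (ctVal tr p) := by
  cases h : tr.get? p.1 with
  | none => simp [ctStepN, ctVal, h]
  | some d => cases h2 : d.get? p.2 <;> simp [ctStepN, ctVal, h, h2]

lemma ctA_eq (words : List String) (n : Int) :
    (words.foldl (fun tr w =>
      (PySem.List.pyRange 0 (PySem.Str.len w + 1) 1).foldl
        (fun tr i => ctStepN tr (ctPair n (ctXs n w) i)) tr)
      PySem.Dict.empty) = (ctPairs words n).foldl ctStepN PySem.Dict.empty := by
  rw [ctPairs, List.foldl_flatMap]
  have hfun : (fun (tr : PySem.Dict String (PySem.Dict String Int)) (w : String) =>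
      (PySem.List.pyRange 0 (PySem.Str.len w + 1) 1).foldl
        (fun tr i => ctStepN tr (ctPair n (ctXs n w) i)) tr) =
      (fun acc w => ((PySem.List.pyRange 0 (PySem.Str.len w + 1) 1).map
        (ctPair n (ctXs n w))).foldl ctStepN acc) := by
    funext acc w
    rw [List.foldl_map]
  rw [hfun]

-- membership of a pair in ps = membership of its second component in the per-key filter
lemma ct_mem_filter_snd (ps : List (String × String)) (c s : String) :
    s ∈ (ps.filter (fun q => q.1 == c)).map (fun q => q.2) ↔ (c, s) ∈ ps := by
  simp only [List.mem_map, List.mem_filter, beq_iff_eq]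
  constructor
  · rintro ⟨q, ⟨hq, rfl⟩, rfl⟩; exact hq
  · intro h; exact ⟨(c, s), ⟨h, rfl⟩, rfl⟩

-- appending a pair with a different first component changes nothing at key c
lemma ctInnerSpec_append_ne (ps : List (String × String)) (p : String × String) (c : String)
    (h : p.1 ≠ c) : ctInnerSpec (ps ++ [p]) c = ctInnerSpec ps c := by
  unfold ctInnerSpec
  have hfilter : (ps ++ [p]).filter (fun q => q.1 == c) = ps.filter (fun q => q.1 == c) := by
    rw [List.filter_append]
    simp [beq_eq_false_iff_ne.mpr h]
  rw [hfilter]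
  apply List.map_congr_left
  intro s _
  have hne : ¬ ((c, s) : String × String) = p := by
    intro hEq; exact h (by rw [← hEq])
  have hne' : ¬ p = (c, s) := fun hEq => hne hEq.symm
  rw [List.count_append, List.count_singleton]
  simp [hne']

-- appending (c, s) with s not yet a successor of c appends a fresh cell of count 1
lemma ctInnerSpec_append_fresh (ps : List (String × String)) (c s : String)
    (hsnot : s ∉ (ps.filter (fun q => q.1 == c)).map (fun q => q.2)) :
    ctInnerSpec (ps ++ [(c, s)]) c = ctInnerSpec ps c ++ [(s, 1)] := by
  have hcount0 : ps.count (c, s) = 0 :=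
    List.count_eq_zero.mpr (fun h => hsnot ((ct_mem_filter_snd ps c s).mpr h))
  unfold ctInnerSpec
  have hfil : (ps ++ [(c, s)]).filter (fun q => q.1 == c) =
      ps.filter (fun q => q.1 == c) ++ [(c, s)] := by
    rw [List.filter_append]; simp
  rw [hfil, List.map_append, List.map_singleton, PySem.List.dedup_eq_ofList,
    PySem.List.dedup_eq_ofList, PySem.Set.ofList_append_singleton,
    PySem.Set.add_of_not_mem (fun h => hsnot ((PySem.Set.mem_ofList _ _).mp h)),
    List.map_append, List.map_singleton]
  congr 1
  · apply List.map_congr_left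
    intro s' hs'
    have hs'mem : s' ∈ (ps.filter (fun q => q.1 == c)).map (fun q => q.2) :=
      (PySem.Set.mem_ofList _ _).mp hs'
    have hne : ¬ ((c, s') : String × String) = (c, s) := by
      intro hEq
      obtain ⟨-, h2⟩ := Prod.mk.injEq .. ▸ hEq
      exact hsnot (h2 ▸ hs'mem)
    have hne' : ¬ s = s' := fun hEq => hne (by rw [hEq])
    rw [List.count_append, List.count_singleton]
    simp [hne']
  · rw [List.count_append, List.count_singleton, hcount0]
    simp

-- appending (c, s) with s already a successor of c bumps that cell in place
lemma ctInnerSpec_append_bump (ps : List (String × String)) (c s : String)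
    (hsmem : s ∈ (ps.filter (fun q => q.1 == c)).map (fun q => q.2)) :
    ctInnerSpec (ps ++ [(c, s)]) c =
      (ctInnerSpec ps c).map (fun r => if r.1 == s then (s, r.2 + 1) else r) := by
  unfold ctInnerSpec
  have hfil : (ps ++ [(c, s)]).filter (fun q => q.1 == c) =
      ps.filter (fun q => q.1 == c) ++ [(c, s)] := by
    rw [List.filter_append]; simp
  rw [hfil, List.map_append, List.map_singleton, PySem.List.dedup_eq_ofList,
    PySem.List.dedup_eq_ofList, PySem.Set.ofList_append_singleton,
    PySem.Set.add_of_mem ((PySem.Set.mem_ofList _ _).mpr hsmem), List.map_map]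
  apply List.map_congr_left
  intro s' _
  by_cases hss : s' = s
  · subst hss
    simp only [Function.comp, beq_self_eq_true, if_pos]
    rw [List.count_append, List.count_singleton]
    simp
  · have hne : ¬ ((c, s) : String × String) = (c, s') := by
      intro hEq
      obtain ⟨-, h2⟩ := Prod.mk.injEq .. ▸ hEq
      exact hss h2.symm
    simp only [Function.comp, beq_iff_eq, if_neg hss]
    rw [List.count_append, List.count_singleton]
    simp [hne]

-- the MAIN invariant: A's nested dict, flattened through .items, IS B's comprehension
lemma ct_main (ps : List (String × String)) :
    ((ps.foldl ctStepN PySem.Dict.empty).items).map (fun q => (q.1, q.2.items)) = ctSpec ps := by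
  induction ps using List.reverseRecOn with
  | nil => rfl
  | append_singleton ps p ih =>
    obtain ⟨c, s⟩ := p
    set M := ps.foldl ctStepN PySem.Dict.empty with hM
    rw [List.foldl_append, List.foldl_cons, List.foldl_nil, ctStepN_eq_insert]
    have hkeys : M.keys = PySem.List.dedup (ps.map (fun q => q.1)) := by
      have := congrArg (List.map (fun r : String × List (String × Int) => r.1)) ih
      simpa [ctSpec, List.map_map, Function.comp_def, PySem.Dict.keys] using this
    have hfst : ((ps ++ [(c, s)]).map (fun q => q.1)) = ps.map (fun q => q.1) ++ [c] := by
      simp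
    by_cases hc : M.contains c = true
    -- ===== key c already present =====
    · have hmemc : c ∈ ps.map (fun q => q.1) := by
        have := (PySem.Dict.contains_iff_mem_keys M c).mp hc
        rw [hkeys, PySem.List.dedup_eq_ofList] at this
        exact (PySem.Set.mem_ofList _ _).mp this
      obtain ⟨d, hd⟩ : ∃ d, M.get? c = some d := by
        rcases h : M.get? c with _ | d
        · rw [PySem.Dict.contains_eq_isSome_get?, h] at hc; simp at hc
        · exact ⟨d, rfl⟩
      -- d.items is B's inner list for c
      have hdit : d.items = ctInnerSpec ps c := by
        have hmem : ((c, d) : String × PySem.Dict String Int) ∈ M.items :=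
          PySem.Dict.mem_items_of_get?_eq_some M hd
        have hmem' : ((c, d.items) : String × List (String × Int)) ∈
            (M.items).map (fun q => (q.1, q.2.items)) := List.mem_map_of_mem hmem
        rw [ih, ctSpec] at hmem'
        obtain ⟨c', -, hEq⟩ := List.mem_map.mp hmem'
        obtain ⟨h1, h2⟩ := Prod.mk.injEq .. ▸ hEq
        rw [← h2, h1]
      have hdkeys : d.keys =
          PySem.List.dedup ((ps.filter (fun q => q.1 == c)).map (fun q => q.2)) := by
        have := congrArg (List.map (fun r : String × Int => r.1)) hdit
        simpa [ctInnerSpec, List.map_map, Function.comp_def, PySem.Dict.keys] using this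
      -- dedup of first components is unchanged
      have hdedup : PySem.List.dedup ((ps ++ [(c, s)]).map (fun q => q.1)) =
          PySem.List.dedup (ps.map (fun q => q.1)) := by
        rw [hfst, PySem.List.dedup_eq_ofList, PySem.List.dedup_eq_ofList,
          PySem.Set.ofList_append_singleton,
          PySem.Set.add_of_mem ((PySem.Set.mem_ofList _ _).mpr hmemc)]
      -- LHS: in-place update of the entry at c
      rw [PySem.Dict.items_insert_of_contains M (ctVal M (c, s)) hc]
      have hmaps : (M.items.map (fun p => if p.1 == c then (c, ctVal M (c, s)) else p)).map
            (fun q => (q.1, q.2.items)) =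
          ((M.items).map (fun q => (q.1, q.2.items))).map
            (fun r => if r.1 == c then (c, (ctVal M (c, s)).items) else r) := by
        rw [List.map_map, List.map_map]
        apply List.map_congr_left
        intro q _
        by_cases h : q.1 == c <;> simp [Function.comp, h]
      rw [hmaps, ih, ctSpec, ctSpec, hdedup, List.map_map]
      apply List.map_congr_left
      intro c' hc'
      by_cases hcc : c' = c
      · subst hcc
        simp only [Function.comp, beq_self_eq_true, if_pos]
        -- show the new inner items equal ctInnerSpec (ps ++ [(c', s)]) c'
        congr 1
        have hsval : ctVal M (c', s) =
            d.insert s ((match d.get? s with | none => 1 | some k => k + 1 : Int)) := by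
          cases h2 : d.get? s <;> simp [ctVal, hd, h2]
        rcases hds : d.get? s with _ | k
        -- s is new at key c'
        · have hsnot : s ∉ (ps.filter (fun q => q.1 == c')).map (fun q => q.2) := by
            intro hmem
            have : s ∈ d.keys := by
              rw [hdkeys, PySem.List.dedup_eq_ofList]
              exact (PySem.Set.mem_ofList _ _).mpr hmem
            rw [PySem.Dict.get?_eq_none_iff_not_mem_keys] at hds
            exact hds this
          have hdc : d.contains s = false := by
            rw [PySem.Dict.contains_eq_isSome_get?, hds]; rfl
          rw [hsval, hds, PySem.Dict.items_insert_of_not_contains d 1 hdc, hdit,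
            ctInnerSpec_append_fresh ps c' s hsnot]
        -- s already counted at key c'
        · have hk : k = (ps.count (c', s) : Int) := by
            have hmemitems : ((s, k) : String × Int) ∈ d.items :=
              PySem.Dict.mem_items_of_get?_eq_some d hds
            rw [hdit] at hmemitems
            obtain ⟨s', -, hEq⟩ := List.mem_map.mp hmemitems
            obtain ⟨h1, h2⟩ := Prod.mk.injEq .. ▸ hEq
            rw [← h2, h1]
          have hsmem : s ∈ (ps.filter (fun q => q.1 == c')).map (fun q => q.2) := by
            have hmemk : s ∈ d.keys := by
              have : d.contains s = true := by
                rw [PySem.Dict.contains_eq_isSome_get?, hds]; rfl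
              exact (PySem.Dict.contains_iff_mem_keys d s).mp this
            rw [hdkeys, PySem.List.dedup_eq_ofList] at hmemk
            exact (PySem.Set.mem_ofList _ _).mp hmemk
          have hdc : d.contains s = true := by
            rw [PySem.Dict.contains_eq_isSome_get?, hds]; rfl
          rw [hsval, hds, PySem.Dict.items_insert_of_contains d (k + 1) hdc, hdit,
            ctInnerSpec_append_bump ps c' s hsmem]
          apply List.map_congr_left
          intro r hr
          simp only [ctInnerSpec] at hr
          obtain ⟨s', hs'mem, hEq⟩ := List.mem_map.mp hr
          by_cases hrs : r.1 == s
          · have hfsteq : s' = r.1 := by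
              have := congrArg Prod.fst hEq
              simpa using this
            have h1 : s' = s := by rw [hfsteq]; exact beq_iff_eq.mp hrs
            have hr2 : r.2 = k := by
              have hsnd := congrArg Prod.snd hEq
              simp only at hsnd
              rw [← hsnd, h1, hk]
            simp [hrs, hr2]
          · simp [hrs]
      · -- other keys are untouched
        have hbeq : (c' == c) = false := beq_eq_false_iff_ne.mpr hcc
        simp only [Function.comp, hbeq, if_neg Bool.false_ne_true]
        rw [ctInnerSpec_append_ne ps (c, s) c' (fun h => hcc h.symm)]
    -- ===== key c is fresh =====
    · have hcf : M.contains c = false := by simpa using hc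
      have hnotmem : c ∉ ps.map (fun q => q.1) := by
        intro h
        rw [PySem.Dict.contains_iff_mem_keys, hkeys, PySem.List.dedup_eq_ofList] at hc
        exact hc ((PySem.Set.mem_ofList _ _).mpr h)
      have hget : M.get? c = none := by
        rcases h : M.get? c with _ | d
        · rfl
        · rw [PySem.Dict.contains_eq_isSome_get?, h] at hcf; simp at hcf
      have hval : ctVal M (c, s) = PySem.Dict.empty.insert s 1 := by
        simp [ctVal, hget]
      have hfilps : ps.filter (fun q => q.1 == c) = [] := by
        apply List.filter_eq_nil_iff.mpr
        intro q hq hbe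
        exact hnotmem (by
          have : q.1 = c := by simpa using hbe
          exact this ▸ List.mem_map_of_mem hq)
      have hinnernil : ctInnerSpec ps c = [] := by
        simp [ctInnerSpec, hfilps, PySem.List.dedup_eq_ofList]
      have hdedup : PySem.List.dedup ((ps ++ [(c, s)]).map (fun q => q.1)) =
          PySem.List.dedup (ps.map (fun q => q.1)) ++ [c] := by
        rw [hfst, PySem.List.dedup_eq_ofList, PySem.List.dedup_eq_ofList,
          PySem.Set.ofList_append_singleton,
          PySem.Set.add_of_not_mem (fun h => hnotmem ((PySem.Set.mem_ofList _ _).mp h))]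
      rw [PySem.Dict.items_insert_of_not_contains M (ctVal M (c, s)) hcf, hval,
        List.map_append, ih, ctSpec, ctSpec, hdedup, List.map_append, List.map_singleton]
      congr 1
      · apply List.map_congr_left
        intro c' hc'
        have hcc : c' ≠ c := by
          intro h; subst h
          exact hnotmem ((PySem.Set.mem_ofList _ _).mp (by
            rw [← PySem.List.dedup_eq_ofList]; exact hc'))
        simp only [ctInnerSpec_append_ne ps (c, s) c' (fun h => hcc h.symm)]
      · have hsnot : s ∉ (ps.filter (fun q => q.1 == c)).map (fun q => q.2) := by
          rw [hfilps]; simp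
        simp only [List.map_singleton, ctInnerSpec_append_fresh ps c s hsnot, hinnernil]
        rfl

-- ===== VERDICT (by name: the statement is the Claim_ definition above) =====
theorem count_transitions_spec : Claim_equal_count_transitions := by
  intro words n _ _
  unfold Spec_count_transitions count_transitions count_transitions_alt
  rw [ctA_eq, ct_main]
  rfl
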